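-- pv_equiv track=rewrite | github.com/koba1996/LawTextParser | output_formatter.py | format_one_string
-- ===== SOURCE A (Python) =====
-- MATCH_START = '\033[91m'
--
-- MATCH_END = '\033[0m'
--
-- def format_one_string(string, index_pairs):
--     if len(index_pairs) == 0:
--         return string
--     formatted_string = ''
--     formatted_string += string[:index_pairs[0][0]]
--     for i in range(len(index_pairs)):
--         formatted_string += MATCH_START + string[index_pairs[i][0]:index_pairs[i][1] + 1] + MATCH_END
--         if i == len(index_pairs) - 1:
--             formatted_string += string[index_pairs[i][1] + 1:]
--         else:
--             formatted_string += string[index_pairs[i][1] + 1:index_pairs[i + 1][0]]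
--     return formatted_string
-- ===== SOURCE B (Python) =====
-- MATCH_START = '\033[91m'
--
-- MATCH_END = '\033[0m'
--
-- def _cuts(index_pairs):
--     # flat boundary table: None, s0, e0+1, s1, e1+1, ..., None
--     cuts = [None]
--     for start, end in index_pairs:
--         cuts.append(start)
--         cuts.append(end + 1)
--     cuts.append(None)
--     return cuts
--
-- def _decorate(pieces):
--     # pieces alternate plain/matched; consume them two at a time
--     if len(pieces) <= 1:
--         return list(pieces)
--     return [pieces[0], MATCH_START + pieces[1] + MATCH_END] + _decorate(pieces[2:])
--
-- def format_one_string(string, index_pairs):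
--     cuts = _cuts(index_pairs)
--     pieces = [string[a:b] for a, b in zip(cuts, cuts[1:])]
--     return ''.join(_decorate(pieces))
-- ===== Notes on version B (the rewrite author's own statement) =====
-- stated objective: alternative
-- what changed: B first builds a flat boundary table [None, s0, e0+1, s1, e1+1, ..., None], slices the string between every pair of consecutive boundaries, and then decorates the resulting piece list two at a time (plain, marked, plain, ...), instead of A's single indexed loop with a look-ahead at index_pairs[i+1] and a last-iteration branch.
import Mathlib
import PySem

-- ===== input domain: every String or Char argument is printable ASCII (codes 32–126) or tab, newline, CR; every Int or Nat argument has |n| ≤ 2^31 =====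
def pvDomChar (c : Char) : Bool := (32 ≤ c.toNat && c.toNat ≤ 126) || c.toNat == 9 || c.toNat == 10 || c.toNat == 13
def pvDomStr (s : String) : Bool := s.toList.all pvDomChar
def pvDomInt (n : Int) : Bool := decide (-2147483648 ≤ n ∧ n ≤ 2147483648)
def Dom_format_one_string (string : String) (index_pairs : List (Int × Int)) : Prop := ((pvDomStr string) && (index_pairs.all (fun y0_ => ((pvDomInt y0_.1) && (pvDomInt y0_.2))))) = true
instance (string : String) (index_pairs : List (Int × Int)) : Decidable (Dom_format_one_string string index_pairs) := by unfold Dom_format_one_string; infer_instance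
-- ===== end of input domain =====

-- B replaces A's indexed loop (with look-ahead and last-iteration branch) by a staged
-- approach: a flat boundary table, slices between consecutive boundaries, then alternate
-- decoration of the piece list consumed two at a time.

def pvMATCH_START : String := "\x1b[91m"

def pvMATCH_END : String := "\x1b[0m"

-- ===== PORT A =====
-- A's loop over i with the 'i == len - 1' branch and the index_pairs[i+1] look-ahead,
-- transcribed as recursion with a one-pair look-ahead pattern.
def pvALoop (string : String) : List (Int × Int) → String
  | [] => ""
  | [(s, e)] =>
      pvMATCH_START ++ PySem.Str.slice string (some s) (some (e + 1)) ++ pvMATCH_END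
        ++ PySem.Str.slice string (some (e + 1)) none
  | (s, e) :: (s2, e2) :: rest =>
      pvMATCH_START ++ PySem.Str.slice string (some s) (some (e + 1)) ++ pvMATCH_END
        ++ PySem.Str.slice string (some (e + 1)) (some s2)
        ++ pvALoop string ((s2, e2) :: rest)

def format_one_string (string : String) (index_pairs : List (Int × Int)) : String :=
  if index_pairs.length = 0 then string
  else
    match index_pairs with
    | [] => string
    | (s0, _) :: _ =>
        "" ++ PySem.Str.slice string none (some s0) ++ pvALoop string index_pairs

-- ===== PORT B =====
-- _cuts: the flat boundary table [none, s0, e0+1, ..., none]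
def pvCutsMid : List (Int × Int) → List (Option Int)
  | [] => []
  | (s, e) :: rest => some s :: some (e + 1) :: pvCutsMid rest

def pvCuts (index_pairs : List (Int × Int)) : List (Option Int) :=
  none :: pvCutsMid index_pairs ++ [none]

-- _decorate: pieces consumed two at a time (plain, marked)
def pvDecorate : List String → List String
  | [] => []
  | [p] => [p]
  | p :: q :: rest => p :: (pvMATCH_START ++ q ++ pvMATCH_END) :: pvDecorate rest

def format_one_string_alt (string : String) (index_pairs : List (Int × Int)) : String :=
  let cuts := pvCuts index_pairs
  let pieces := (cuts.zip cuts.tail).map (fun ab : Option Int × Option Int => PySem.Str.slice string ab.1 ab.2)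
  String.join (pvDecorate pieces)

-- ===== PRECONDITION & SPEC =====
def Spec_format_one_string (string : String) (index_pairs : List (Int × Int)) (out : String) : Prop := out = format_one_string_alt string index_pairs
instance (string : String) (index_pairs : List (Int × Int)) (out : String) : Decidable (Spec_format_one_string string index_pairs out) := by unfold Spec_format_one_string; infer_instance

-- ===== CLAIM (what is proved, stated in full; the proofs are below) =====
def Claim_equal_format_one_string : Prop := ∀ (string : String) (index_pairs : List (Int × Int)), Dom_format_one_string string index_pairs → Spec_format_one_string string index_pairs (format_one_string string index_pairs)

-- ===== LEMMAS AND PROOFS =====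

-- pieces of the boundary table starting at boundary a
def pvPieces (string : String) (a : Option Int) (ip : List (Int × Int)) : List String :=
  ((a :: pvCutsMid ip ++ [none]).zip (pvCutsMid ip ++ [none])).map
    (fun ab : Option Int × Option Int => PySem.Str.slice string ab.1 ab.2)

theorem pvPieces_nil (string : String) (a : Option Int) :
    pvPieces string a [] = [PySem.Str.slice string a none] := by
  simp [pvPieces, pvCutsMid]

theorem pvPieces_cons (string : String) (a : Option Int) (s e : Int) (rest : List (Int × Int)) :
    pvPieces string a ((s, e) :: rest)
      = PySem.Str.slice string a (some s)
        :: PySem.Str.slice string (some s) (some (e + 1))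
        :: pvPieces string (some (e + 1)) rest := by
  cases rest with
  | nil => simp [pvPieces, pvCutsMid]
  | cons p r => obtain ⟨s2, e2⟩ := p; simp [pvPieces, pvCutsMid]

theorem pvFoldl_append (a : String) (l : List String) :
    List.foldl (fun r s => r ++ s) a l = a ++ List.foldl (fun r s => r ++ s) "" l := by
  induction l generalizing a with
  | nil => simp
  | cons x xs ih =>
      simp only [List.foldl_cons]
      rw [ih (a ++ x), ih ("" ++ x)]
      simp [String.append_assoc]

theorem pvJoin_cons (a : String) (l : List String) :
    String.join (a :: l) = a ++ String.join l := by
  simp only [String.join, List.foldl_cons]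
  rw [pvFoldl_append]
  simp

-- the core correspondence: B's join-of-decorated-pieces equals A's prefix + loop
theorem pv_main (string : String) (ip : List (Int × Int)) (a : Option Int) :
    String.join (pvDecorate (pvPieces string a ip))
      = (match ip with
         | [] => PySem.Str.slice string a none
         | (s, _) :: _ => PySem.Str.slice string a (some s) ++ pvALoop string ip) := by
  induction ip generalizing a with
  | nil => simp [pvPieces_nil, pvDecorate, String.join]
  | cons p rest ih =>
      obtain ⟨s, e⟩ := p
      rw [pvPieces_cons]
      cases rest with
      | nil =>
          simp [pvPieces_nil, pvDecorate, pvALoop, String.join, String.append_assoc]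
      | cons q r =>
          obtain ⟨s2, e2⟩ := q
          have h := ih (a := some (e + 1))
          simp only [pvDecorate, pvJoin_cons, h]
          simp [pvALoop, String.append_assoc]

theorem pv_slice_all (string : String) :
    PySem.Str.slice string none none = string := by
  simp [PySem.Str.slice]

-- ===== VERDICT (by name: the statement is the Claim_ definition above) =====
theorem format_one_string_spec : Claim_equal_format_one_string := by
  intro string index_pairs _
  unfold Spec_format_one_string format_one_string format_one_string_alt
  have h : pvPieces string none index_pairs
      = ((pvCuts index_pairs).zip (pvCuts index_pairs).tail).map
          (fun ab : Option Int × Option Int => PySem.Str.slice string ab.1 ab.2) := by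
    simp [pvPieces, pvCuts]
  match index_pairs with
  | [] => simp [← h, pv_main, pv_slice_all]
  | (s0, e0) :: rest => simp [← h, pv_main]
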